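-- pv_equiv track=rewrite | github.com/BJV-git/Data_structures_and_Algorithms | Data_structures_and_Algorithms/math/pythagorean_triplets.py | pythagoren_triplets
-- ===== SOURCE A (Python) =====
-- def pythagoren_triplets(nums):
--     lnums=len(nums)
--     triplets=0
--     nums=[i**2 for i in nums]
--
--     nums.sort()
--     for i in range(lnums-1,-1,-1):
--         j=0
--         k=i-1
--
--         while j<k:
--             if nums[j]+nums[k] == nums[i]:
--                 triplets+=1
--                 break
--             elif nums[j]+nums[k] < nums[i]:
--                 j+=1
--             else:
--                 k-=1
--     return triplets
-- ===== SOURCE B (Python) =====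
-- def pythagoren_triplets(nums):
--     squares = sorted(x * x for x in nums)
--     seen = {}
--     count = 0
--     for s in squares:
--         for v in seen:
--             w = s - v
--             if w in seen and (w != v or seen[v] >= 2):
--                 count += 1
--                 break
--         seen[s] = seen.get(s, 0) + 1
--     return count
-- ===== Notes on version B (the rewrite author's own statement) =====
-- stated objective: alternative
-- what changed: A runs a fresh two-pointer scan over the sorted squares for every target index; B makes one forward pass over the sorted squares maintaining a dict counter of the earlier squares and, for each square, looks for a complementary pair among the distinct earlier values.
import Mathlib
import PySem

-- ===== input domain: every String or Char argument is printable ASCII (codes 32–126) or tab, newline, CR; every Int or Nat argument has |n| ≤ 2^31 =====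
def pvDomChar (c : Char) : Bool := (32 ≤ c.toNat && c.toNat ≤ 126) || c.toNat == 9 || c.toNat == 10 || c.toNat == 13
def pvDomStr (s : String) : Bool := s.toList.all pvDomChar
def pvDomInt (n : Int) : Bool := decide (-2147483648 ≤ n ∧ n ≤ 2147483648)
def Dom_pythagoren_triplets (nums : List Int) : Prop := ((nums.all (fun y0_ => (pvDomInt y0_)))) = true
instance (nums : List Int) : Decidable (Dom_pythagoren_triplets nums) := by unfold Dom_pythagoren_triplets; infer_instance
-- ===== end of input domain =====

-- B replaces A's per-target two-pointer scan by one forward pass over the sorted squares that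
-- maintains a dict counter of the earlier squares (objective: alternative, same worst-case cost).

-- ===== PORT A =====
-- the 'while j < k' loop of A; fuel only makes the recursion structural (k - j + 1 iterations suffice,
-- the call site passes length + 1); indices are always in range, so pyGetD's default is never used
def pvTwoPtr (nums : List Int) (target j k : Int) : Nat → Bool
  | 0 => false
  | fuel + 1 =>
    if j < k then
      if PySem.List.pyGetD nums j 0 + PySem.List.pyGetD nums k 0 == target then true
      else if PySem.List.pyGetD nums j 0 + PySem.List.pyGetD nums k 0 < target then
        pvTwoPtr nums target (j + 1) k fuel
      else pvTwoPtr nums target j (k - 1) fuel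
    else false

def pythagoren_triplets (nums : List Int) : Int :=
  let lnums : Int := nums.length
  let nums2 := PySem.List.sorted (nums.map (fun i => i ^ 2)) (fun x => x) false
  (PySem.List.pyRange (lnums - 1) (-1) (-1)).foldl
    (fun triplets i =>
      if pvTwoPtr nums2 (PySem.List.pyGetD nums2 i 0) 0 (i - 1) (nums2.length + 1) then triplets + 1
      else triplets) 0

-- ===== PORT B =====
def pythagoren_triplets_alt (nums : List Int) : Int :=
  let squares := PySem.List.sorted (nums.map (fun x => x * x)) (fun x => x) false
  (squares.foldl
    (fun (st : PySem.Dict Int Int × Int) s =>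
      (st.1.insert s (st.1.getD s 0 + 1),
       if st.1.keys.any (fun v =>
            st.1.contains (s - v) && ((s - v) != v || decide (2 ≤ st.1.getD v 0))) then st.2 + 1
       else st.2))
    (PySem.Dict.empty, 0)).2

-- ===== PRECONDITION & SPEC =====
def Spec_pythagoren_triplets (nums : List Int) (out : Int) : Prop := out = pythagoren_triplets_alt nums
instance (nums : List Int) (out : Int) : Decidable (Spec_pythagoren_triplets nums out) := by unfold Spec_pythagoren_triplets; infer_instance

-- ===== CLAIM (what is proved, stated in full; the proofs are below) =====
def Claim_equal_pythagoren_triplets : Prop := ∀ (nums : List Int), Dom_pythagoren_triplets nums → Spec_pythagoren_triplets nums (pythagoren_triplets nums)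

-- ===== LEMMAS AND PROOFS =====

-- Bool indicator: some pair of positions a < b of p sums to s
def pairB (p : List Int) (s : Int) : Bool :=
  (List.range p.length).any (fun b => (List.range b).any (fun a => p[a]! + p[b]! == s))

-- reference count: walk the list left to right, counting elements that are a sum of two earlier ones
def cnt (p : List Int) : List Int → Int
  | [] => 0
  | s :: rest => (if pairB p s then 1 else 0) + cnt (p ++ [s]) rest

lemma pairB_iff (p : List Int) (s : Int) :
    pairB p s = true ↔ ∃ a b : Nat, a < b ∧ b < p.length ∧ p[a]! + p[b]! = s := by
  simp only [pairB, List.any_eq_true, List.mem_range, beq_iff_eq]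
  constructor
  · rintro ⟨b, hb, a, hab, h⟩; exact ⟨a, b, hab, hb, h⟩
  · rintro ⟨a, b, hab, hb, h⟩; exact ⟨b, hb, a, hab, h⟩

lemma sorted_mono (l : List Int) (hs : l.Pairwise (fun a b => a ≤ b)) (a b : Nat)
    (hab : a ≤ b) (hb : b < l.length) : l[a]! ≤ l[b]! := by
  rcases Nat.eq_or_lt_of_le hab with rfl | h
  · exact le_refl _
  · rw [getElem!_pos l a (by omega), getElem!_pos l b hb]
    exact List.pairwise_iff_getElem.mp hs a b (by omega) hb h

lemma pyGetD_bang (l : List Int) (j : Int) (h0 : 0 ≤ j) (h : j < (l.length : Int)) :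
    PySem.List.pyGetD l j 0 = l[j.toNat]! := by
  rw [PySem.List.pyGetD_eq_getElem (h0 := h0) (h1 := h), getElem!_pos]

-- correctness of A's two-pointer loop on a sorted list
lemma twoPtr_iff (l : List Int) (hs : l.Pairwise (fun a b => a ≤ b)) (t : Int) :
    ∀ (fuel : Nat) (j k : Int), 0 ≤ j → k < (l.length : Int) → (k - j).toNat < fuel →
    (pvTwoPtr l t j k fuel = true ↔
      ∃ a b : Nat, j ≤ (a : Int) ∧ a < b ∧ (b : Int) ≤ k ∧ l[a]! + l[b]! = t) := by
  intro fuel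
  induction fuel with
  | zero => intro j k _ _ hf; omega
  | succ fuel ih =>
    intro j k hj hk hf
    by_cases hjk : j < k
    · have hk0 : (0:Int) ≤ k := by omega
      have hgj : PySem.List.pyGetD l j 0 = l[j.toNat]! := pyGetD_bang l j hj (by omega)
      have hgk : PySem.List.pyGetD l k 0 = l[k.toNat]! := pyGetD_bang l k hk0 hk
      rw [pvTwoPtr, if_pos hjk, hgj, hgk]
      by_cases heq : l[j.toNat]! + l[k.toNat]! = t
      · rw [if_pos (beq_iff_eq.mpr heq)]
        simp only [true_iff]
        exact ⟨j.toNat, k.toNat, by omega, by omega, by omega, heq⟩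
      · rw [if_neg (by simp only [beq_iff_eq]; exact heq)]
        by_cases hlt : l[j.toNat]! + l[k.toNat]! < t
        · rw [if_pos hlt, ih (j+1) k (by omega) hk (by omega)]
          constructor
          · rintro ⟨a, b, ha, hab, hb, hsum⟩; exact ⟨a, b, by omega, hab, hb, hsum⟩
          · rintro ⟨a, b, ha, hab, hb, hsum⟩
            refine ⟨a, b, ?_, hab, hb, hsum⟩
            by_contra hcon
            have haj : a = j.toNat := by omega
            have hbk : l[b]! ≤ l[k.toNat]! := sorted_mono l hs b k.toNat (by omega) (by omega)
            rw [haj] at hsum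
            omega
        · rw [if_neg hlt, ih j (k-1) hj (by omega) (by omega)]
          constructor
          · rintro ⟨a, b, ha, hab, hb, hsum⟩; exact ⟨a, b, ha, hab, by omega, hsum⟩
          · rintro ⟨a, b, ha, hab, hb, hsum⟩
            refine ⟨a, b, ha, hab, ?_, hsum⟩
            by_contra hcon
            have hbk : b = k.toNat := by omega
            have haj : l[j.toNat]! ≤ l[a]! := sorted_mono l hs j.toNat a (by omega) (by omega)
            rw [hbk] at hsum
            omega
    · rw [pvTwoPtr, if_neg hjk]
      simp only [Bool.false_eq_true, false_iff]
      rintro ⟨a, b, ha, hab, hb, _⟩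
      omega

lemma two_le_count_of_two (v : Int) : ∀ (p : List Int) (a b : Nat), a < b → b < p.length →
    p[a]! = v → p[b]! = v → 2 ≤ p.count v := by
  intro p
  induction p with
  | nil => intro a b _ hb _ _; simp at hb
  | cons x xs ih =>
    intro a b hab hb hav hbv
    obtain ⟨b', rfl⟩ : ∃ b', b = b' + 1 := ⟨b - 1, by omega⟩
    rw [List.getElem!_cons_succ] at hbv
    have hb' : b' < xs.length := by simp at hb; omega
    cases a with
    | zero =>
      rw [List.getElem!_cons_zero] at hav
      have hmem : v ∈ xs := by
        rw [getElem!_pos xs b' hb'] at hbv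
        exact hbv ▸ List.getElem_mem hb'
      have h1 : 0 < xs.count v := List.count_pos_iff.mpr hmem
      simp [hav]
      omega
    | succ a' =>
      rw [List.getElem!_cons_succ] at hav
      have := ih a' b' (by omega) hb' hav hbv
      simp [List.count_cons]
      omega

lemma count_two_exists (v : Int) : ∀ (p : List Int), 2 ≤ p.count v →
    ∃ a b : Nat, a < b ∧ b < p.length ∧ p[a]! = v ∧ p[b]! = v := by
  intro p
  induction p with
  | nil => simp
  | cons x xs ih =>
    intro h
    by_cases hx : x = v
    · have h1 : 0 < xs.count v := by rw [hx, List.count_cons_self] at h; omega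
      obtain ⟨i, hi, hiv⟩ := List.mem_iff_getElem.mp (List.count_pos_iff.mp h1)
      refine ⟨0, i + 1, by omega, by simp; omega, by simp [hx], ?_⟩
      rw [List.getElem!_cons_succ, getElem!_pos xs i hi]
      exact hiv
    · have h2 : 2 ≤ xs.count v := by rwa [List.count_cons_of_ne hx] at h
      obtain ⟨a, b, hab, hb, hav, hbv⟩ := ih h2
      exact ⟨a + 1, b + 1, by omega, by simp; omega,
        by rw [List.getElem!_cons_succ]; exact hav, by rw [List.getElem!_cons_succ]; exact hbv⟩

-- multiset membership form ↔ index-pair form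
lemma pair_multiset (p : List Int) (s : Int) :
    (∃ v ∈ p, (s - v) ∈ p ∧ ((s - v) ≠ v ∨ 2 ≤ p.count v)) ↔
    ∃ a b : Nat, a < b ∧ b < p.length ∧ p[a]! + p[b]! = s := by
  constructor
  · rintro ⟨v, hv, hw, hcase⟩
    by_cases hvv : s - v = v
    · have hcnt : 2 ≤ p.count v := by
        rcases hcase with h | h
        · exact absurd hvv h
        · exact h
      obtain ⟨a, b, hab, hb, hav, hbv⟩ := count_two_exists v p hcnt
      exact ⟨a, b, hab, hb, by rw [hav, hbv]; omega⟩
    · obtain ⟨a, ha, hav⟩ := List.mem_iff_getElem.mp hv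
      obtain ⟨b, hb, hbw⟩ := List.mem_iff_getElem.mp hw
      have hab : a ≠ b := by
        intro h
        subst h
        exact hvv (hbw.symm.trans hav)
      rcases lt_or_gt_of_ne hab with h | h
      · exact ⟨a, b, h, hb, by rw [getElem!_pos p a ha, getElem!_pos p b hb, hav, hbw]; ring⟩
      · exact ⟨b, a, h, ha, by rw [getElem!_pos p b hb, getElem!_pos p a ha, hav, hbw]; ring⟩
  · rintro ⟨a, b, hab, hb, hsum⟩
    have ha : a < p.length := by omega
    have hmema : p[a]! ∈ p := by rw [getElem!_pos p a ha]; exact List.getElem_mem ha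
    have hmemb : p[b]! ∈ p := by rw [getElem!_pos p b hb]; exact List.getElem_mem hb
    have hw : s - p[a]! = p[b]! := by omega
    refine ⟨p[a]!, hmema, by rw [hw]; exact hmemb, ?_⟩
    by_cases hvv : p[b]! = p[a]!
    · exact Or.inr (two_le_count_of_two p[a]! p a b hab hb rfl hvv)
    · exact Or.inl (by rw [hw]; exact hvv)

lemma check_eq (p : List Int) (s : Int) :
    ((p.foldl (fun d x => d.insert x (d.getD x 0 + 1)) (PySem.Dict.empty : PySem.Dict Int Int)).keys.any (fun v =>
        (p.foldl (fun d x => d.insert x (d.getD x 0 + 1)) (PySem.Dict.empty : PySem.Dict Int Int)).contains (s - v) &&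
        ((s - v) != v ||
          decide (2 ≤ (p.foldl (fun d x => d.insert x (d.getD x 0 + 1)) (PySem.Dict.empty : PySem.Dict Int Int)).getD v 0))))
      = pairB p s := by
  rw [PySem.Dict.foldl_insert_getD_add_one_eq_counter, Bool.eq_iff_iff, pairB_iff,
    ← pair_multiset]
  simp only [List.any_eq_true, PySem.Dict.keys_counter, PySem.Set.mem_ofList, Bool.and_eq_true,
    PySem.Dict.contains_counter, Bool.or_eq_true, bne_iff_ne, decide_eq_true_eq,
    PySem.Dict.getD_counter, List.contains_iff_mem]
  constructor
  · rintro ⟨v, hv, h1, h2⟩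
    refine ⟨v, hv, h1, ?_⟩
    rcases h2 with h | h
    · exact Or.inl h
    · exact Or.inr (by exact_mod_cast h)
  · rintro ⟨v, hv, h1, h2⟩
    refine ⟨v, hv, h1, ?_⟩
    rcases h2 with h | h
    · exact Or.inl h
    · exact Or.inr (by exact_mod_cast h)

lemma bfold (rest : List Int) : ∀ (p : List Int) (c : Int),
    (rest.foldl
      (fun (st : PySem.Dict Int Int × Int) s =>
        (st.1.insert s (st.1.getD s 0 + 1),
         if st.1.keys.any (fun v =>
              st.1.contains (s - v) && ((s - v) != v || decide (2 ≤ st.1.getD v 0))) then st.2 + 1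
         else st.2))
      (p.foldl (fun d x => d.insert x (d.getD x 0 + 1)) (PySem.Dict.empty : PySem.Dict Int Int), c)).2
    = c + cnt p rest := by
  induction rest with
  | nil => intro p c; simp [cnt]
  | cons s rest ih =>
    intro p c
    rw [List.foldl_cons]
    dsimp only
    rw [check_eq p s]
    have h1 : (p.foldl (fun d x => d.insert x (d.getD x 0 + 1)) (PySem.Dict.empty : PySem.Dict Int Int)).insert s
        ((p.foldl (fun d x => d.insert x (d.getD x 0 + 1)) (PySem.Dict.empty : PySem.Dict Int Int)).getD s 0 + 1)
        = (p ++ [s]).foldl (fun d x => d.insert x (d.getD x 0 + 1)) (PySem.Dict.empty : PySem.Dict Int Int) := by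
      rw [List.foldl_append]
      rfl
    rw [h1, ih (p ++ [s])]
    show _ = c + ((if pairB p s then 1 else 0) + cnt (p ++ [s]) rest)
    split_ifs <;> ring

lemma foldl_if_count (l : List Int) (f : Int → Bool) :
    ∀ init : Int, l.foldl (fun acc x => if f x then acc + 1 else acc) init = init + (l.countP f : Int) := by
  induction l with
  | nil => intro init; simp
  | cons x xs ih =>
    intro init
    rw [List.foldl_cons, ih, List.countP_cons]
    cases h : f x
    · simp
    · simp
      ring

lemma take_bang (l : List Int) (i a : Nat) (ha : a < i) (hl : a < l.length) :
    (l.take i)[a]! = l[a]! := by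
  rw [getElem!_pos (l.take i) a (by simp; omega), getElem!_pos l a hl, List.getElem_take]

lemma condA_eq (sq : List Int) (hs : sq.Pairwise (fun a b => a ≤ b)) (i : Nat) (hi : i < sq.length) :
    pvTwoPtr sq (PySem.List.pyGetD sq (i : Int) 0) 0 ((i : Int) - 1) (sq.length + 1)
      = pairB (sq.take i) (sq[i]!) := by
  have ht : PySem.List.pyGetD sq (i : Int) 0 = sq[i]! := by
    rw [pyGetD_bang sq i (by omega) (by exact_mod_cast hi)]
    simp
  have h2 := twoPtr_iff sq hs (PySem.List.pyGetD sq (i : Int) 0) (sq.length + 1) 0 ((i : Int) - 1)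
    (by omega) (by omega) (by omega)
  rw [Bool.eq_iff_iff, h2, pairB_iff]
  constructor
  · rintro ⟨a, b, _, hab, hb, hsum⟩
    have hbi : b < i := by omega
    refine ⟨a, b, hab, by simp; omega, ?_⟩
    rw [take_bang sq i a (by omega) (by omega), take_bang sq i b (by omega) (by omega)]
    rw [ht] at hsum
    exact hsum
  · rintro ⟨a, b, hab, hb, hsum⟩
    have hbi : b < i := by simp at hb; omega
    refine ⟨a, b, by omega, hab, by omega, ?_⟩
    rw [take_bang sq i a (by omega) (by omega), take_bang sq i b (by omega) (by omega)] at hsum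
    rw [ht]
    exact hsum

lemma cnt_eq (rest : List Int) : ∀ p : List Int,
    cnt p rest = (((List.range rest.length).countP (fun j => pairB (p ++ rest.take j) rest[j]!)) : Int) := by
  induction rest with
  | nil => intro p; simp [cnt]
  | cons s rest ih =>
    intro p
    show (if pairB p s then (1:Int) else 0) + cnt (p ++ [s]) rest = _
    rw [List.length_cons, List.range_succ_eq_map, List.countP_cons, List.countP_map, ih (p ++ [s])]
    have hfun : ((fun j => pairB (p ++ (s :: rest).take j) (s :: rest)[j]!) ∘ Nat.succ)
        = (fun j => pairB ((p ++ [s]) ++ rest.take j) rest[j]!) := by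
      funext j
      simp [Function.comp, List.take_succ_cons, List.append_assoc]
    rw [hfun]
    simp only [List.take_zero, List.append_nil, List.getElem!_cons_zero]
    cases h : pairB p s
    · simp
    · simp
      ring

-- the sorted list of squares both programs build
def sq2 (nums : List Int) : List Int :=
  PySem.List.sorted (nums.map (fun x => x * x)) (fun x => x) false

lemma B_eq (nums : List Int) : pythagoren_triplets_alt nums = cnt [] (sq2 nums) := by
  have h := bfold (sq2 nums) [] 0
  simpa [sq2, pythagoren_triplets_alt] using h

lemma A_eq (nums : List Int) : pythagoren_triplets nums = cnt [] (sq2 nums) := by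
  have hs : (sq2 nums).Pairwise (fun a b => a ≤ b) := by
    simpa [sq2] using PySem.List.sorted_pairwise (nums.map (fun x => x * x)) (fun x => x)
  have hlen : (sq2 nums).length = nums.length := by
    simp [sq2, PySem.List.length_sorted]
  have hL : PySem.List.sorted (nums.map (fun i => i ^ 2)) (fun x => x) false = sq2 nums := by
    simp [sq2, pow_two]
  simp only [pythagoren_triplets]
  rw [hL, PySem.List.pyRange_neg_one_eq_reverse,
    show ((-1 : Int) + 1) = 0 from by ring,
    show ((nums.length : Int) - 1 + 1) = (nums.length : Int) from by ring,
    foldl_if_count, List.countP_reverse, PySem.List.pyRange_zero_natCast, List.countP_map,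
    cnt_eq (sq2 nums) [], hlen, zero_add]
  congr 1
  apply List.countP_congr
  intro j hj
  have hj' : j < (sq2 nums).length := by rw [hlen]; exact List.mem_range.mp hj
  simp only [Function.comp, List.nil_append]
  rw [← hlen, condA_eq (sq2 nums) hs j hj']

-- ===== VERDICT (by name: the statement is the Claim_ definition above) =====
theorem pythagoren_triplets_spec : Claim_equal_pythagoren_triplets := by
  intro nums _
  unfold Spec_pythagoren_triplets
  rw [A_eq, B_eq]
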